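-- pv_equiv track=rewrite | github.com/Sky-Nik/contest-python | codeforces/0616/E.py | calcDiv
-- ===== SOURCE A (Python) =====
-- from math import floor, sqrt
--
-- mod = 10**9 + 7
--
-- def _sum(n):
-- 	return (n * (n + 1) // 2) % mod
--
-- def __sum(lf, rg):
-- 	return (_sum(rg) - _sum(lf - 1)) % mod
--
-- def calcDiv(n, m):
-- 	m = min(n, m)
--
-- 	ans, minVal = 0, m
--
-- 	for i in range(1, floor(sqrt(n)) + 1):
-- 		lf, rg = n // (i + 1), n // i
--
-- 		rg = min(rg, m)
--
-- 		if lf >= rg: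
-- 			continue
--
-- 		minVal = lf
--
-- 		ans += i * __sum(lf + 1, rg)
-- 		ans %= mod
--
-- 	for i in range(1, minVal + 1):
-- 		ans += n // i * i
-- 		ans %= mod
--
-- 	return ans
-- ===== SOURCE B (Python) =====
-- mod = 10**9 + 7
--
-- def _tri(k):
--     return k * (k + 1) // 2
--
-- def calcDiv(n, m):
--     m = min(n, m)
--     ans = 0
--     j = 1
--     while j <= m:
--         q = n // j
--         r = min(m, n // q)
--         ans = (ans + q * (_tri(r) - _tri(j - 1))) % mod
--         j = r + 1
--     return ans
-- ===== Notes on version B (the rewrite author's own statement) =====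
-- stated objective: simpler
-- what changed: Replaces A's sqrt-indexed block decomposition (blocks (n//(i+1), n//i] for i=1..floor(sqrt(n)), mod-reduced _sum/__sum helpers, plus a separate linear tail loop) by the classic single while loop that walks quotient blocks left to right, jumping j to min(m, n//(n//j)) + 1 and adding n//j times the exact triangular-number difference mod 10**9+7.
import Mathlib
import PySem

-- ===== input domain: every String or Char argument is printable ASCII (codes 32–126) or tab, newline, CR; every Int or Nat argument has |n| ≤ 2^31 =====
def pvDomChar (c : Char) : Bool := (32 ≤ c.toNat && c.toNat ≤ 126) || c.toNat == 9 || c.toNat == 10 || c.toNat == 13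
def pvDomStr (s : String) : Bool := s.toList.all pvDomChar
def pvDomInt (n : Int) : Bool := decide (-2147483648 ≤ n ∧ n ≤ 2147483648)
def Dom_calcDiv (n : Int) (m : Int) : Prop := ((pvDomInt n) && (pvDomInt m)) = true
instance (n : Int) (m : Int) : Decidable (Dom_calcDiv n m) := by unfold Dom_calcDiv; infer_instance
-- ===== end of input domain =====

-- B replaces A's sqrt-indexed block decomposition (blocks (n//(i+1), n//i] for
-- i = 1..⌊√n⌋ plus a separate linear tail loop, with mod-reduced _sum/__sum helpers)
-- by the classic left-to-right quotient-block walk: one while loop jumping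
-- j -> min(m, n//(n//j)) + 1, one unreduced triangular-number helper. Same cost class.

-- ===== PORT A =====
def pvMod : Int := 10 ^ 9 + 7

-- _sum(n) = (n * (n + 1) // 2) % mod
def pvSumA (n : Int) : Int := PySem.Int.mod (PySem.Int.floordiv (n * (n + 1)) 2) pvMod

-- __sum(lf, rg) = (_sum(rg) - _sum(lf - 1)) % mod
def pvSumA2 (lf rg : Int) : Int := PySem.Int.mod (pvSumA rg - pvSumA (lf - 1)) pvMod

-- the body of A's first loop, over the state (ans, minVal)
def pvStepA (n m : Int) (st : Int × Int) (i : Int) : Int × Int :=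
  let lf := PySem.Int.floordiv n (i + 1)
  let rg := min (PySem.Int.floordiv n i) m
  if lf ≥ rg then st
  else (PySem.Int.mod (st.1 + i * pvSumA2 (lf + 1) rg) pvMod, lf)

-- the body of A's second loop ('ans += n // i * i; ans %= mod')
def pvStep2 (n : Int) (ans j : Int) : Int :=
  PySem.Int.mod (ans + PySem.Int.floordiv n j * j) pvMod

-- floor(sqrt(n)) is ported by hand as Int.sqrt: exact on 0 ≤ n ≤ 2^31 (all of Dom_),
-- where CPython's double sqrt is correctly rounded and its floor is ⌊√n⌋.
def calcDiv (n : Int) (m : Int) : Int :=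
  let m' := min n m
  let st := (PySem.List.pyRange 1 (Int.sqrt n + 1) 1).foldl (pvStepA n m') (0, m')
  (PySem.List.pyRange 1 (st.2 + 1) 1).foldl (pvStep2 n) st.1

-- ===== PORT B =====
-- _tri(k) = k * (k + 1) // 2
def pvTriB (k : Int) : Int := PySem.Int.floordiv (k * (k + 1)) 2

-- Source B's while loop; the fuel only makes the recursion total (on every input the
-- Python loop runs, j advances by at least 1 per iteration, so fuel never runs out)
def pvLoopB (n m' : Int) : Nat → Int → Int → Int
  | 0, _, ans => ans
  | fuel + 1, j, ans =>
    if j ≤ m' then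
      let q := PySem.Int.floordiv n j
      let r := min m' (PySem.Int.floordiv n q)
      pvLoopB n m' fuel (r + 1) (PySem.Int.mod (ans + q * (pvTriB r - pvTriB (j - 1))) pvMod)
    else ans

def calcDiv_alt (n : Int) (m : Int) : Int :=
  let m' := min n m
  pvLoopB n m' (m' + 1).toNat 1 0

-- ===== PRECONDITION & SPEC =====
-- Python A raises ValueError (math.sqrt of a negative) exactly when n < 0; it returns on every n ≥ 0.
def Pre_calcDiv (n : Int) (m : Int) : Prop := 0 ≤ n
instance (n : Int) (m : Int) : Decidable (Pre_calcDiv n m) := by unfold Pre_calcDiv; infer_instance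

def pvWitness_calcDiv : Int × Int := (10, 4)

def Spec_calcDiv (n : Int) (m : Int) (out : Int) : Prop := out = calcDiv_alt n m
instance (n : Int) (m : Int) (out : Int) : Decidable (Spec_calcDiv n m out) := by unfold Spec_calcDiv; infer_instance

-- ===== CLAIM (what is proved, stated in full; the proofs are below) =====
def Claim_equal_calcDiv : Prop := ∀ (n : Int) (m : Int), Dom_calcDiv n m → Pre_calcDiv n m → Spec_calcDiv n m (calcDiv n m)

-- ===== LEMMAS AND PROOFS =====

theorem pvMod_pos : (0 : Int) < pvMod := by norm_num [pvMod]

-- the exact (unreduced) floor-sum ∑_{a<j≤b} (n//j)·j that both programs accumulate mod pvMod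
noncomputable def pvS (n a b : Int) : Int := ∑ j ∈ Finset.Ioc a b, n / j * j

-- A's first loop, as a function of its upper bound s (the same fold calcDiv runs)
def pvLoopA (n m' s : Int) : Int × Int :=
  (PySem.List.pyRange 1 (s + 1) 1).foldl (pvStepA n m') (0, m')

theorem pvSum_Ioc_split (f : Int → Int) {a b c : Int} (h1 : a ≤ b) (h2 : b ≤ c) :
    (∑ j ∈ Finset.Ioc a b, f j) + (∑ j ∈ Finset.Ioc b c, f j) = ∑ j ∈ Finset.Ioc a c, f j := by
  rw [← Finset.sum_union (Finset.Ioc_disjoint_Ioc_of_le le_rfl),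
      Finset.Ioc_union_Ioc_eq_Ioc h1 h2]

theorem pvIoc_succ_singleton (b : Int) : Finset.Ioc b (b + 1) = {b + 1} := by
  ext x; simp [Finset.mem_Ioc]; omega

theorem pvSum_Ioc_succ_top (f : Int → Int) {a b : Int} (h : a ≤ b) :
    (∑ j ∈ Finset.Ioc a (b + 1), f j) = (∑ j ∈ Finset.Ioc a b, f j) + f (b + 1) := by
  rw [← pvSum_Ioc_split f h (by omega), pvIoc_succ_singleton, Finset.sum_singleton]

-- the true triangular number; A's _sum is its reduction mod pvMod
def pvTri (k : Int) : Int := k * (k + 1) / 2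

theorem pvTwo_mul_tri (k : Int) : 2 * pvTri k = k * (k + 1) := by
  obtain ⟨t, ht⟩ := Int.even_mul_succ_self k
  have h2 : k * (k + 1) = 2 * t := by omega
  simp [pvTri, h2, Int.mul_ediv_cancel_left t (by norm_num : (2:Int) ≠ 0)]

theorem pvGauss {a b : Int} (h : a ≤ b) :
    (∑ j ∈ Finset.Ioc a b, j) = pvTri b - pvTri a := by
  induction b, h using Int.le_induction with
  | base => simp
  | succ b hb ih =>
    rw [pvSum_Ioc_succ_top _ hb, ih]
    have h1 := pvTwo_mul_tri b
    have h2 := pvTwo_mul_tri (b + 1)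
    have h3 : 2 * pvTri (b + 1) = 2 * pvTri b + 2 * (b + 1) := by rw [h1, h2]; ring
    omega

theorem pvSumA_eq (k : Int) : pvSumA k = pvTri k % pvMod := by
  simp [pvSumA, pvTri, PySem.Int.mod_eq_emod_of_pos pvMod_pos]

theorem pvModSelf (x : Int) : Int.ModEq pvMod (x % pvMod) x :=
  Int.emod_emod_of_dvd x dvd_rfl

-- quotients are constant on a block: n//(i+1) < j ≤ n//i ⇒ n//j = i
theorem pvQuotConst {n i j : Int} (hn : 0 ≤ n) (hi : 0 < i)
    (h1 : n / (i + 1) < j) (h2 : j ≤ n / i) : n / j = i := by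
  have hj : 0 < j := lt_of_le_of_lt (Int.ediv_nonneg hn (by omega)) h1
  have hji : j * i ≤ n := (Int.le_ediv_iff_mul_le hi).mp h2
  have hlo : i ≤ n / j := (Int.le_ediv_iff_mul_le hj).mpr (by nlinarith)
  have hup : n < j * (i + 1) := (Int.ediv_lt_iff_lt_mul (by omega)).mp h1
  have hhi : n / j < i + 1 := (Int.ediv_lt_iff_lt_mul hj).mpr (by nlinarith)
  omega

-- n//(i+1) ≤ n//i for n ≥ 0
theorem pvQuotAntitone {n i : Int} (hn : 0 ≤ n) (hi : 0 < i) :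
    n / (i + 1) ≤ n / i := by
  have hq : 0 ≤ n / (i + 1) := Int.ediv_nonneg hn (by omega)
  have h1 : (i + 1) * (n / (i + 1)) + n % (i + 1) = n := Int.mul_ediv_add_emod n (i + 1)
  have h2 : 0 ≤ n % (i + 1) := Int.emod_nonneg n (by omega)
  exact (Int.le_ediv_iff_mul_le hi).mpr (by nlinarith)

-- the shared mod-accumulating loop, nonnegative bound: stays in [0, pvMod)
-- and is congruent to 'init + the plain floor-sum'
theorem pvModfoldNN (n b : Int) (hb : 0 ≤ b) :
    ∀ a : Int, 0 ≤ a → a < pvMod →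
      0 ≤ (PySem.List.pyRange 1 (b + 1) 1).foldl (pvStep2 n) a ∧
      (PySem.List.pyRange 1 (b + 1) 1).foldl (pvStep2 n) a < pvMod ∧
      Int.ModEq pvMod ((PySem.List.pyRange 1 (b + 1) 1).foldl (pvStep2 n) a) (a + pvS n 0 b) := by
  induction b, hb using Int.le_induction with
  | base =>
    intro a ha hap
    rw [PySem.List.pyRange_one_eq_nil (by omega)]
    have hS : pvS n 0 0 = 0 := by simp [pvS]
    exact ⟨ha, hap, by rw [List.foldl_nil, hS, add_zero]⟩
  | succ b hb ih =>
    intro a ha hap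
    rw [PySem.List.pyRange_one_succ_right (by omega), List.foldl_append]
    obtain ⟨h0, h1, h2⟩ := ih a ha hap
    set r := (PySem.List.pyRange 1 (b + 1) 1).foldl (pvStep2 n) a with hr
    simp only [List.foldl_cons, List.foldl_nil]
    rw [pvStep2, PySem.Int.mod_eq_emod_of_pos pvMod_pos,
        PySem.Int.floordiv_eq_ediv_of_pos (by omega : (0:Int) < b + 1)]
    refine ⟨Int.emod_nonneg _ (by have := pvMod_pos; omega), Int.emod_lt_of_pos _ pvMod_pos, ?_⟩
    have hS : pvS n 0 (b + 1) = pvS n 0 b + n / (b + 1) * (b + 1) :=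
      pvSum_Ioc_succ_top _ (by omega)
    have hstep : Int.ModEq pvMod (r + n / (b + 1) * (b + 1))
        (a + pvS n 0 b + n / (b + 1) * (b + 1)) := h2.add_right _
    exact (pvModSelf _).trans (hstep.trans (by rw [hS, add_assoc]))

-- the same loop for any bound (empty when b < 0)
theorem pvModfold (n b : Int) :
    ∀ a : Int, 0 ≤ a → a < pvMod →
      0 ≤ (PySem.List.pyRange 1 (b + 1) 1).foldl (pvStep2 n) a ∧
      (PySem.List.pyRange 1 (b + 1) 1).foldl (pvStep2 n) a < pvMod ∧
      Int.ModEq pvMod ((PySem.List.pyRange 1 (b + 1) 1).foldl (pvStep2 n) a) (a + pvS n 0 b) := by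
  rcases le_or_gt 0 b with hb | hb
  · exact pvModfoldNN n b hb
  · intro a ha hap
    rw [PySem.List.pyRange_one_eq_nil (by omega)]
    have hS : pvS n 0 b = 0 := by
      simp [pvS, Finset.Ioc_eq_empty (by omega : ¬ (0:Int) < b)]
    exact ⟨ha, hap, by rw [List.foldl_nil, hS, add_zero]⟩

-- B-side: pvTriB is the exact triangular number (division by 2 is exact)
theorem pvTriB_eq (k : Int) : pvTriB k = pvTri k :=
  PySem.Int.floordiv_eq_ediv_of_pos (by norm_num)

-- invariant of B's while loop: ans ∈ [0, pvMod), ans ≡ floor-sum over (0, j-1],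
-- and the loop returns a value ≡ the full floor-sum over (0, m']
theorem pvLoopB_inv {n m' : Int} (hn : 0 ≤ n) (hm : m' ≤ n) :
    ∀ (fuel : Nat) (j ans : Int), 1 ≤ j → j ≤ m' + 1 → (m' + 1 - j).toNat ≤ fuel →
      0 ≤ ans → ans < pvMod → Int.ModEq pvMod ans (pvS n 0 (j - 1)) →
      0 ≤ pvLoopB n m' fuel j ans ∧ pvLoopB n m' fuel j ans < pvMod ∧
      Int.ModEq pvMod (pvLoopB n m' fuel j ans) (pvS n 0 m') := by
  intro fuel
  induction fuel with
  | zero =>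
    intro j ans h1 h2 hf ha0 ha1 hmod
    have hj : j - 1 = m' := by omega
    rw [hj] at hmod
    simp only [pvLoopB]
    exact ⟨ha0, ha1, hmod⟩
  | succ fuel ih =>
    intro j ans h1 h2 hf ha0 ha1 hmod
    simp only [pvLoopB]
    by_cases hjm : j ≤ m'
    · rw [if_pos hjm]
      have hjpos : (0:Int) < j := by omega
      have hq1 : 1 ≤ n / j := (Int.le_ediv_iff_mul_le hjpos).mpr (by omega)
      rw [PySem.Int.floordiv_eq_ediv_of_pos hjpos,
          PySem.Int.floordiv_eq_ediv_of_pos (show (0:Int) < n / j by omega)]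
      set q := n / j with hqd
      set r := min m' (n / q) with hrd
      have hqj : q * j ≤ n := by
        have hid : j * (n / j) + n % j = n := Int.mul_ediv_add_emod n j
        have hnn : 0 ≤ n % j := Int.emod_nonneg n (by omega)
        nlinarith
      have hjnq : j ≤ n / q := (Int.le_ediv_iff_mul_le (by omega)).mpr (by nlinarith)
      have hjr : j ≤ r := by omega
      have hquot : ∀ k : Int, j - 1 < k → k ≤ r → n / k = q := by
        intro k hk1 hk2
        have hkpos : (0:Int) < k := by omega
        have hkqle : k * q ≤ n := (Int.le_ediv_iff_mul_le (by omega : (0:Int) < q)).mp (by omega)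
        have hkq : q ≤ n / k := (Int.le_ediv_iff_mul_le hkpos).mpr (by nlinarith)
        have hnk : 0 ≤ n / k := Int.ediv_nonneg hn (by omega)
        have hkk : n / k * k ≤ n := by
          have hid : k * (n / k) + n % k = n := Int.mul_ediv_add_emod n k
          have hnn : 0 ≤ n % k := Int.emod_nonneg n (by omega)
          nlinarith
        have hkq2 : n / k ≤ q := (Int.le_ediv_iff_mul_le hjpos).mpr (by nlinarith)
        omega
      have hblk : q * (pvTriB r - pvTriB (j - 1)) = pvS n (j - 1) r := by
        rw [pvTriB_eq r, pvTriB_eq (j - 1), ← pvGauss (by omega : j - 1 ≤ r),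
            Finset.mul_sum, pvS]
        refine Finset.sum_congr rfl fun k hk => ?_
        rw [Finset.mem_Ioc] at hk
        rw [hquot k hk.1 hk.2, mul_comm]
      refine ih (r + 1) _ (by omega) (by omega) (by omega)
        (PySem.Int.mod_nonneg _ pvMod_pos) (PySem.Int.mod_lt _ pvMod_pos) ?_
      rw [PySem.Int.mod_eq_emod_of_pos pvMod_pos]
      have hsp : pvS n 0 (j - 1) + pvS n (j - 1) r = pvS n 0 r :=
        pvSum_Ioc_split _ (by omega) (by omega)
      have hnext : Int.ModEq pvMod (ans + q * (pvTriB r - pvTriB (j - 1))) (pvS n 0 (r + 1 - 1)) := by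
        rw [hblk]
        have h9 : (r:Int) + 1 - 1 = r := by ring
        rw [h9, ← hsp]
        exact hmod.add_right _
      exact (pvModSelf _).trans hnext
    · rw [if_neg hjm]
      have hj : j - 1 = m' := by omega
      rw [hj] at hmod
      exact ⟨ha0, ha1, hmod⟩

-- invariant of A's first loop: minVal = min m' (n//(s+1)), ans ∈ [0, pvMod) and
-- ans ≡ the floor-sum over (minVal, m']
theorem pvLoop1 {n m' : Int} (hn : 0 ≤ n) (hm : m' ≤ n) (s : Int) (hs : 0 ≤ s) :
    (pvLoopA n m' s).2 = min m' (n / (s + 1)) ∧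
    0 ≤ (pvLoopA n m' s).1 ∧ (pvLoopA n m' s).1 < pvMod ∧
    Int.ModEq pvMod (pvLoopA n m' s).1 (pvS n (pvLoopA n m' s).2 m') := by
  induction s, hs using Int.le_induction with
  | base =>
    have hL : pvLoopA n m' 0 = (0, m') := by
      rw [pvLoopA, PySem.List.pyRange_one_eq_nil (by omega), List.foldl_nil]
    rw [hL]
    have hne : n / (0 + 1) = n := by norm_num
    refine ⟨by rw [hne]; omega, le_refl 0, pvMod_pos, ?_⟩
    have hS : pvS n m' m' = 0 := by simp [pvS]
    rw [hS]
  | succ s hs ih =>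
    obtain ⟨hst2, h0, h1, h2⟩ := ih
    have hL : pvLoopA n m' (s + 1) = pvStepA n m' (pvLoopA n m' s) (s + 1) := by
      rw [pvLoopA, pvLoopA, PySem.List.pyRange_one_succ_right (by omega), List.foldl_append,
          List.foldl_cons, List.foldl_nil]
    set st := pvLoopA n m' s with hstd
    have hanti : n / (s + 1 + 1) ≤ n / (s + 1) := pvQuotAntitone hn (by omega)
    have hqnn : 0 ≤ n / (s + 1 + 1) := Int.ediv_nonneg hn (by omega)
    rw [hL, pvStepA]
    simp only [PySem.Int.floordiv_eq_ediv_of_pos (by omega : (0:Int) < s + 1 + 1),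
               PySem.Int.floordiv_eq_ediv_of_pos (by omega : (0:Int) < s + 1)]
    set lf := n / (s + 1 + 1) with hlf
    set rg := min (n / (s + 1)) m' with hrg
    have hrgst : st.2 = rg := by omega
    split_ifs with hge
    · exact ⟨by omega, h0, h1, by rw [hrgst] at h2 ⊢; exact h2⟩
    · rw [not_le] at hge
      refine ⟨by omega, PySem.Int.mod_nonneg _ pvMod_pos, PySem.Int.mod_lt _ pvMod_pos, ?_⟩
      rw [PySem.Int.mod_eq_emod_of_pos pvMod_pos]
      have hX : Int.ModEq pvMod (pvSumA2 (lf + 1) rg) (pvTri rg - pvTri lf) := by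
        rw [pvSumA2, PySem.Int.mod_eq_emod_of_pos pvMod_pos]
        have he : lf + 1 - 1 = lf := by ring
        rw [he, pvSumA_eq, pvSumA_eq]
        exact (pvModSelf _).trans ((pvModSelf _).sub (pvModSelf _))
      have hGauss : pvTri rg - pvTri lf = ∑ j ∈ Finset.Ioc lf rg, j :=
        (pvGauss (le_of_lt hge)).symm
      have hblk : (s + 1) * (∑ j ∈ Finset.Ioc lf rg, j) = pvS n lf rg := by
        rw [Finset.mul_sum, pvS]
        refine Finset.sum_congr rfl fun j hj => ?_
        rw [Finset.mem_Ioc] at hj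
        have hq : n / j = s + 1 := pvQuotConst hn (by omega) hj.1 (by omega)
        rw [hq, mul_comm]
      have hmul : Int.ModEq pvMod ((s + 1) * pvSumA2 (lf + 1) rg) (pvS n lf rg) := by
        have h := hX.mul_left (s + 1)
        rw [hGauss, hblk] at h
        exact h
      have hsplit : pvS n lf rg + pvS n rg m' = pvS n lf m' :=
        pvSum_Ioc_split _ (le_of_lt hge) (by omega)
      rw [hrgst] at h2
      refine (pvModSelf _).trans ?_
      calc st.1 + (s + 1) * pvSumA2 (lf + 1) rg
          ≡ pvS n rg m' + pvS n lf rg [ZMOD pvMod] := h2.add hmul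
        _ = pvS n lf m' := by linarith [hsplit]

-- ===== VERDICT (by name: the statement is the Claim_ definition above) =====
theorem calcDiv_spec : Claim_equal_calcDiv := by
  intro n m _ hpre
  unfold Pre_calcDiv at hpre
  unfold Spec_calcDiv
  set m' := min n m with hm'
  have hm : m' ≤ n := min_le_left n m
  have hA : calcDiv n m =
      (PySem.List.pyRange 1 ((pvLoopA n m' (Int.sqrt n)).2 + 1) 1).foldl (pvStep2 n)
        (pvLoopA n m' (Int.sqrt n)).1 := rfl
  have hB : calcDiv_alt n m = pvLoopB n m' (m' + 1).toNat 1 0 := rfl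
  obtain ⟨hst2, h0, h1, h2⟩ := pvLoop1 (m' := m') hpre hm (Int.sqrt n) (Int.sqrt_nonneg n)
  set st := pvLoopA n m' (Int.sqrt n) with hstd
  obtain ⟨hA0, hA1, hA2⟩ := pvModfold n st.2 st.1 h0 h1
  have hBfacts : 0 ≤ calcDiv_alt n m ∧ calcDiv_alt n m < pvMod ∧
      Int.ModEq pvMod (calcDiv_alt n m) (pvS n 0 m') := by
    rcases le_or_gt 0 m' with hm0 | hm0
    · have hz : pvS n 0 (1 - 1) = 0 := by norm_num [pvS]
      have h00 : Int.ModEq pvMod 0 (pvS n 0 (1 - 1)) := by rw [hz]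
      have hfacts := pvLoopB_inv hpre hm (m' + 1).toNat 1 0 (by omega) (by omega)
        (by omega) (le_refl 0) pvMod_pos h00
      rwa [← hB] at hfacts
    · have hf : (m' + 1).toNat = 0 := by omega
      have hz : pvS n 0 m' = 0 := by
        simp [pvS, Finset.Ioc_eq_empty (by omega : ¬ (0:Int) < m')]
      rw [hB, hf, hz]
      exact ⟨le_refl 0, pvMod_pos, Int.ModEq.refl 0⟩
  obtain ⟨hB0, hB1, hB2⟩ := hBfacts
  rw [← hA] at hA0 hA1 hA2
  have hq : 0 ≤ n / (Int.sqrt n + 1) := Int.ediv_nonneg hpre (by have := Int.sqrt_nonneg n; omega)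
  have hkey : Int.ModEq pvMod (st.1 + pvS n 0 st.2) (pvS n 0 m') := by
    rcases le_or_gt 0 st.2 with hpos | hneg
    · have hs2m : st.2 ≤ m' := by omega
      have hsplit : pvS n 0 st.2 + pvS n st.2 m' = pvS n 0 m' :=
        pvSum_Ioc_split _ hpos hs2m
      calc st.1 + pvS n 0 st.2 ≡ pvS n st.2 m' + pvS n 0 st.2 [ZMOD pvMod] := h2.add_right _
      _ = pvS n 0 m' := by linarith [hsplit]
    · have hs2 : st.2 = m' := by omega
      have hz1 : pvS n 0 st.2 = 0 := by
        rw [hs2]; simp [pvS, Finset.Ioc_eq_empty (by omega : ¬ (0:Int) < m')]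
      have hz2 : pvS n st.2 m' = 0 := by rw [hs2]; simp [pvS]
      have hz3 : pvS n 0 m' = 0 := by
        simp [pvS, Finset.Ioc_eq_empty (by omega : ¬ (0:Int) < m')]
      rw [hz1, hz3, add_zero]
      rw [hz2] at h2
      exact h2
  have hAB : Int.ModEq pvMod (calcDiv n m) (calcDiv_alt n m) :=
    (hA2.trans hkey).trans hB2.symm
  have heq : calcDiv n m % pvMod = calcDiv_alt n m % pvMod := hAB
  rwa [Int.emod_eq_of_lt hA0 hA1, Int.emod_eq_of_lt hB0 hB1] at heq
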